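-- pv_equiv track=rewrite | github.com/seancheick/PharmaGuide_Pipeline | scripts/reports/alias_collision_report.py | _substantive_tokens
-- ===== SOURCE A (Python) =====
-- def _substantive_tokens(value: str) -> set[str]:
--     chars = []
--     for ch in value.lower():
--         chars.append(ch if ch.isalnum() else " ")
--     return {
--         token
--         for token in "".join(chars).split()
--         if len(token) > 2 and token not in {"and", "the", "with", "from"}
--     }
-- ===== SOURCE B (Python) =====
-- def _substantive_tokens(value: str) -> set[str]:
--     stop = {"and", "the", "with", "from"}
--     result = set()
--     buf = []
--     for ch in value.lower():
--         if ch.isalnum():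
--             buf.append(ch)
--         else:
--             if len(buf) > 2:
--                 token = "".join(buf)
--                 if token not in stop:
--                     result.add(token)
--             buf = []
--     if len(buf) > 2:
--         token = "".join(buf)
--         if token not in stop:
--             result.add(token)
--     return result
-- ===== Notes on version B (the rewrite author's own statement) =====
-- stated objective: alternative
-- what changed: Single-pass tokenizer over the lowered characters with an explicit token buffer, instead of building a spaced intermediate string, splitting it, and filtering the pieces in a set comprehension.
import Mathlib
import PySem

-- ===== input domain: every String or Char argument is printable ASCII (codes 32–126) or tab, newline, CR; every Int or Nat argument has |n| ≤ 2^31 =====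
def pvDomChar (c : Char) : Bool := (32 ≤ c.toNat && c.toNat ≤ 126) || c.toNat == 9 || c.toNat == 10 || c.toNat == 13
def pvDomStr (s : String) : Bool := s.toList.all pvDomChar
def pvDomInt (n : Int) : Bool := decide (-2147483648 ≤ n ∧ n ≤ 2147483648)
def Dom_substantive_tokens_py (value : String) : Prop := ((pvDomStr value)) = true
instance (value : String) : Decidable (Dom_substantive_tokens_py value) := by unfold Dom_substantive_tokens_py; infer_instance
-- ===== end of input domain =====

-- B replaces A's build-spaced-string / split / filter-comprehension pipeline with a single-pass
-- tokenizer keeping an explicit token buffer (objective: alternative decomposition, same O(n) cost).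

-- ===== PORT A =====
-- A: replace each non-alphanumeric char of value.lower() by ' ', split on whitespace,
-- keep tokens of length > 2 outside the stopword set, collected into a set.
def substantive_tokens_py (value : String) : List String :=
  let chars : List Char :=
    (PySem.Chars.lower value.toList).foldl
      (fun acc ch => acc ++ [if PySem.Chars.isalnum ch then ch else ' ']) []
  ((PySem.Chars.split₀ chars).foldl
      (fun s tok =>
        if tok.length > 2 ∧
            tok ∉ [['a','n','d'], ['t','h','e'], ['w','i','t','h'], ['f','r','o','m']]
        then PySem.Set.add s tok else s)
      (PySem.Set.empty : PySem.Set (List Char))).map String.ofList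

-- ===== PORT B =====
-- flush the current buffer into the result set (only substantive, non-stopword tokens)
def pvFlush (s : PySem.Set (List Char)) (buf : List Char) : PySem.Set (List Char) :=
  if buf.length > 2 ∧
      buf ∉ [['a','n','d'], ['t','h','e'], ['w','i','t','h'], ['f','r','o','m']]
  then PySem.Set.add s buf else s

def substantive_tokens_py_alt (value : String) : List String :=
  let st :=
    (PySem.Chars.lower value.toList).foldl
      (fun st ch =>
        if PySem.Chars.isalnum ch then (st.1, st.2 ++ [ch])
        else (pvFlush st.1 st.2, ([] : List Char)))
      ((PySem.Set.empty : PySem.Set (List Char)), ([] : List Char))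
  (pvFlush st.1 st.2).map String.ofList

-- ===== PRECONDITION & SPEC =====
def Spec_substantive_tokens_py (value : String) (out : List String) : Prop := out = substantive_tokens_py_alt value
instance (value : String) (out : List String) : Decidable (Spec_substantive_tokens_py value out) := by unfold Spec_substantive_tokens_py; infer_instance

-- ===== CLAIM (what is proved, stated in full; the proofs are below) =====
def Claim_equal_substantive_tokens_py : Prop := ∀ (value : String), Dom_substantive_tokens_py value → Spec_substantive_tokens_py value (substantive_tokens_py value)

-- ===== LEMMAS AND PROOFS =====

-- B's loop body, named for the proofs
def pvBStep (st : PySem.Set (List Char) × List Char) (ch : Char) :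
    PySem.Set (List Char) × List Char :=
  if PySem.Chars.isalnum ch then (st.1, st.2 ++ [ch])
  else (pvFlush st.1 st.2, ([] : List Char))

theorem pvFlush_nil (s : PySem.Set (List Char)) : pvFlush s [] = s := by
  simp [pvFlush]

theorem pv_alnum_not_space (c : Char) (h : PySem.Chars.isalnum c = true) :
    PySem.Chars.isspace c = false := by
  simp [PySem.Chars.isalnum, PySem.Chars.isalpha, PySem.Chars.isdigit,
    PySem.Chars.isupper, PySem.Chars.islower, PySem.Chars.isspace,
    Char.le_def, UInt32.le_iff_toNat_le] at h ⊢
  omega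

theorem pv_go_acc (cs cur : List Char) (accs : List (List Char)) :
    PySem.Chars.split₀.go cs cur (accs) = accs.reverse ++ PySem.Chars.split₀.go cs cur [] := by
  induction cs generalizing cur accs with
  | nil =>
    cases hc : cur.isEmpty <;> simp only [PySem.Chars.split₀.go, hc] <;> simp
  | cons c rest ih =>
    by_cases hs : PySem.Chars.isspace c
    · by_cases h : cur.isEmpty
      · simp only [PySem.Chars.split₀.go, hs, h]
        simpa using ih [] accs
      · simp only [PySem.Chars.split₀.go, hs, h, if_true, if_false, Bool.false_eq_true]
        rw [ih _ (cur.reverse :: accs), ih _ [cur.reverse]]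
        simp
    · simp only [PySem.Chars.split₀.go, hs, if_false, Bool.false_eq_true]
      exact ih _ _

theorem pv_key (cs : List Char) (s : PySem.Set (List Char)) (buf : List Char)
    (hbuf : ∀ c ∈ buf, PySem.Chars.isspace c = false) :
    pvFlush (cs.foldl pvBStep (s, buf)).1 (cs.foldl pvBStep (s, buf)).2
      = (PySem.Chars.split₀.go
          (cs.map (fun ch => if PySem.Chars.isalnum ch then ch else ' '))
          buf.reverse []).foldl pvFlush s := by
  induction cs generalizing s buf with
  | nil =>
    cases buf with
    | nil => simp [PySem.Chars.split₀.go, pvFlush_nil]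
    | cons b bs => simp [PySem.Chars.split₀.go]
  | cons c rest ih =>
    by_cases h : PySem.Chars.isalnum c
    · have hns : PySem.Chars.isspace c = false := pv_alnum_not_space c h
      have hbuf' : ∀ x ∈ buf ++ [c], PySem.Chars.isspace x = false := by
        intro x hx
        rcases List.mem_append.1 hx with hx | hx
        · exact hbuf x hx
        · simp at hx; subst hx; exact hns
      simp only [List.map_cons, h, if_true, List.foldl_cons, pvBStep,
        PySem.Chars.split₀.go, hns, Bool.false_eq_true, if_false]
      rw [show (s, buf ++ [c]) = ((s, buf).1, (s, buf).2 ++ [c]) from rfl]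
      have := ih s (buf ++ [c]) hbuf'
      simpa [PySem.Chars.split₀.go, hns] using this
    · have hsp : PySem.Chars.isspace ' ' = true := by decide
      simp only [List.map_cons, h, if_false, Bool.false_eq_true, List.foldl_cons, pvBStep]
      cases buf with
      | nil =>
        simp only [List.reverse_nil]
        rw [show PySem.Chars.split₀.go (' ' :: List.map _ rest) [] [] =
              PySem.Chars.split₀.go (List.map (fun ch => if PySem.Chars.isalnum ch then ch else ' ') rest) [] [] by
            simp [PySem.Chars.split₀.go, hsp]]
        rw [pvFlush_nil]
        simpa using ih s [] (by simp)
      | cons b bs =>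
        have hne : ((b :: bs).reverse).isEmpty = false := by
          simp [List.isEmpty_eq_false_iff]
        rw [show PySem.Chars.split₀.go (' ' :: List.map (fun ch => if PySem.Chars.isalnum ch then ch else ' ') rest) (b :: bs).reverse [] =
              PySem.Chars.split₀.go (List.map (fun ch => if PySem.Chars.isalnum ch then ch else ' ') rest) [] [(b :: bs).reverse.reverse] by
            simp [PySem.Chars.split₀.go, hsp]]
        rw [pv_go_acc]
        simp only [List.reverse_cons, List.reverse_nil,
          List.nil_append, List.foldl_append, List.foldl_cons, List.foldl_nil]
        simpa using ih (pvFlush s (b :: bs)) [] (by simp)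

-- ===== VERDICT (by name: the statement is the Claim_ definition above) =====
theorem substantive_tokens_py_spec : Claim_equal_substantive_tokens_py := by
  intro value _
  show substantive_tokens_py value = substantive_tokens_py_alt value
  unfold substantive_tokens_py substantive_tokens_py_alt
  simp only
  rw [PySem.List.foldl_append_singleton_eq_map]
  have := congrArg (List.map String.ofList)
    (pv_key (PySem.Chars.lower value.toList) PySem.Set.empty [] (by simp))
  exact this.symm
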